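-- pv_equiv track=rewrite | github.com/BehrozRazaq/AoC2024 | 4/1.py | get_neighbour_offsets
-- ===== SOURCE A (Python) =====
-- def get_neighbour_offsets(grid, r, c):
--     norm = lambda left, right: (int(left / 3), int(right / 3))
--
--     dirs = [(-3, -3), (-3, 0), (-3, 3), (0, -3), (0, 3), (3, -3), (3, 0), (3, 3)]
--     potentials = []
--     for r_off, c_off in dirs:
--         pot_r, pot_c = r + r_off, c + c_off
--         if pot_r >= 0 and pot_r < len(grid) and pot_c >= 0 and pot_c < len(grid):
--             potentials.append(norm(r_off, c_off))
--
--     return potentials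
-- ===== SOURCE B (Python) =====
-- def get_neighbour_offsets(grid, r, c):
--     n = len(grid)
--     offs = (-3, 0, 3)
--     vr = [ro for ro in offs if 0 <= r + ro < n]
--     vc = [co for co in offs if 0 <= c + co < n]
--     return [(int(ro / 3), int(co / 3))
--             for ro in vr for co in vc if (ro, co) != (0, 0)]
-- ===== Notes on version B (the rewrite author's own statement) =====
-- stated objective: alternative
-- what changed: Replaces the single scan over 8 explicit offset pairs with two independent 1-D axis filters (valid row offsets, valid column offsets) whose cartesian product, minus the (0,0) pair, is produced in row-major order.
import Mathlib
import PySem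

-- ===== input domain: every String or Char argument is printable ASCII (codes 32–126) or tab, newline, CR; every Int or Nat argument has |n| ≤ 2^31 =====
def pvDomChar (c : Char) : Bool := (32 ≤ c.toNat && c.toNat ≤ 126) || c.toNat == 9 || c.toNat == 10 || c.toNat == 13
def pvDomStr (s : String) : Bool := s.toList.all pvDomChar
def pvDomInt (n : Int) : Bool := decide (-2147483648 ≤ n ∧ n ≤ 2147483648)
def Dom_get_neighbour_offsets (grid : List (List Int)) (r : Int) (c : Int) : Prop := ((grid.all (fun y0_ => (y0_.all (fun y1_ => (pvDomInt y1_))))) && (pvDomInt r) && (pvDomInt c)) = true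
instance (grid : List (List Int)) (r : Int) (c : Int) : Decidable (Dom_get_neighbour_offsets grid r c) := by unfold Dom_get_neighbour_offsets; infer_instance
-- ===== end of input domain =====

-- B re-decomposes A's single scan over 8 explicit offset pairs into two 1-D axis filters plus their product (same row-major order, (0,0) skipped); return values proved equal on all inputs.

-- ===== PORT A =====
-- norm = int(off/3): float division then int() truncation; on the only arguments used (−3, 0, 3) this is exactly Int.tdiv off 3.
def get_neighbour_offsets (grid : List (List Int)) (r : Int) (c : Int) : List (Int × Int) :=
  let norm : Int → Int → Int × Int := fun left right => (left.tdiv 3, right.tdiv 3)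
  let dirs : List (Int × Int) := [(-3, -3), (-3, 0), (-3, 3), (0, -3), (0, 3), (3, -3), (3, 0), (3, 3)]
  dirs.foldl (fun potentials d =>
    let pot_r := r + d.1
    let pot_c := c + d.2
    if pot_r ≥ 0 ∧ pot_r < (grid.length : Int) ∧ pot_c ≥ 0 ∧ pot_c < (grid.length : Int) then
      potentials ++ [norm d.1 d.2]
    else potentials) []

-- ===== PORT B =====
def get_neighbour_offsets_alt (grid : List (List Int)) (r : Int) (c : Int) : List (Int × Int) :=
  let n : Int := grid.length
  let offs : List Int := [-3, 0, 3]
  let vr := offs.filter (fun ro => decide (0 ≤ r + ro) && decide (r + ro < n))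
  let vc := offs.filter (fun co => decide (0 ≤ c + co) && decide (c + co < n))
  vr.flatMap (fun ro =>
    (vc.filter (fun co => !(decide (ro = 0) && decide (co = 0)))).map
      (fun co => (ro.tdiv 3, co.tdiv 3)))

-- ===== PRECONDITION & SPEC =====
def Spec_get_neighbour_offsets (grid : List (List Int)) (r : Int) (c : Int) (out : List (Int × Int)) : Prop := out = get_neighbour_offsets_alt grid r c
instance (grid : List (List Int)) (r : Int) (c : Int) (out : List (Int × Int)) : Decidable (Spec_get_neighbour_offsets grid r c out) := by unfold Spec_get_neighbour_offsets; infer_instance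

-- ===== CLAIM (what is proved, stated in full; the proofs are below) =====
def Claim_equal_get_neighbour_offsets : Prop := ∀ (grid : List (List Int)) (r : Int) (c : Int), Dom_get_neighbour_offsets grid r c → Spec_get_neighbour_offsets grid r c (get_neighbour_offsets grid r c)

-- ===== LEMMAS AND PROOFS =====

-- Both sides depend on the input only through the two axis validity predicates R and C;
-- abstracted over them, the equality is a finite check on their six relevant values.
theorem pv_key (R C : Int → Bool) :
    ([(-3, -3), (-3, 0), (-3, 3), (0, -3), (0, 3), (3, -3), (3, 0), (3, 3)] : List (Int × Int)).foldl
      (fun potentials d =>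
        if R d.1 && C d.2 then potentials ++ [(d.1.tdiv 3, d.2.tdiv 3)] else potentials) []
    = (([-3, 0, 3] : List Int).filter R).flatMap (fun ro =>
        ((([-3, 0, 3] : List Int).filter C).filter (fun co => !(decide (ro = 0) && decide (co = 0)))).map
          (fun co => (ro.tdiv 3, co.tdiv 3))) := by
  cases hR1 : R (-3) <;> cases hR2 : R 0 <;> cases hR3 : R 3 <;>
  cases hC1 : C (-3) <;> cases hC2 : C 0 <;> cases hC3 : C 3 <;>
    simp [hR1, hR2, hR3, hC1, hC2, hC3]

-- ===== VERDICT (by name: the statement is the Claim_ definition above) =====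
theorem get_neighbour_offsets_spec : Claim_equal_get_neighbour_offsets := by
  intro grid r c _
  show get_neighbour_offsets grid r c = get_neighbour_offsets_alt grid r c
  have hb :
      (fun (potentials : List (Int × Int)) (d : Int × Int) =>
        let pot_r := r + d.1
        let pot_c := c + d.2
        if pot_r ≥ 0 ∧ pot_r < (grid.length : Int) ∧ pot_c ≥ 0 ∧ pot_c < (grid.length : Int) then
          potentials ++ [(d.1.tdiv 3, d.2.tdiv 3)]
        else potentials)
      = (fun (potentials : List (Int × Int)) (d : Int × Int) =>
        if (fun x => decide (0 ≤ r + x) && decide (r + x < (grid.length : Int))) d.1 &&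
           (fun x => decide (0 ≤ c + x) && decide (c + x < (grid.length : Int))) d.2 then
          potentials ++ [(d.1.tdiv 3, d.2.tdiv 3)]
        else potentials) := by
    funext potentials d
    simp only [ge_iff_le, Bool.and_eq_true, decide_eq_true_eq, and_assoc]
  calc get_neighbour_offsets grid r c
      = ([(-3, -3), (-3, 0), (-3, 3), (0, -3), (0, 3), (3, -3), (3, 0), (3, 3)] : List (Int × Int)).foldl
          (fun potentials d =>
            if (fun x => decide (0 ≤ r + x) && decide (r + x < (grid.length : Int))) d.1 &&
               (fun x => decide (0 ≤ c + x) && decide (c + x < (grid.length : Int))) d.2 then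
              potentials ++ [(d.1.tdiv 3, d.2.tdiv 3)]
            else potentials) [] := by
        unfold get_neighbour_offsets; rw [← hb]
    _ = get_neighbour_offsets_alt grid r c :=
        (pv_key (fun x => decide (0 ≤ r + x) && decide (r + x < (grid.length : Int)))
                (fun x => decide (0 ≤ c + x) && decide (c + x < (grid.length : Int)))).trans rfl
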